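-- pv_equiv track=rewrite | github.com/showengineer/dj-eye | tools/ltc_gen.py | make_ltc_bitstream
-- ===== SOURCE A (Python) =====
-- def set_bits(bits, start, value, count):
--     for i in range(count):
--         bits[start + i] = (value >> i) & 1
--
-- def make_ltc_frame(frame_number, fps, *, drop_frame = False):
--     """"Generates a raw LTC frame.
--
--         Parameters
--         ----------
--         frame_number : int
--             The frame number. The time is calculated from this value
--         fps : int
--             The LTC frame rate.
--         drop_frame : bool
--             Set the drop frame
--     """
--     fps_int = int(round(fps))
--
--     frames = frame_number % fps_int
--     total_seconds = frame_number // fps_int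
--     seconds = total_seconds % 60
--     minutes = (total_seconds // 60) % 60
--     hours = (total_seconds // 3600) % 24
--
--     bits = [0] * 80
--     # Frames
--     set_bits(bits, 0, frames % 10, 4)       # frame units, bits 0-3
--     set_bits(bits, 8, frames // 10, 2)      # frame tens, bits 8-9
--     bits[10] = 1 if drop_frame else 0       # drop-frame flag
--     bits[11] = 0                            # color-frame flag
--
--     # Seconds
--     set_bits(bits, 16, seconds % 10, 4)     # seconds units, bits 16-19
--     set_bits(bits, 24, seconds // 10, 3)    # seconds tens, bits 24-26
--     bits[27] = 0                            # biphase correction / flag bit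
--
--     # Minutes
--     set_bits(bits, 32, minutes % 10, 4)     # minutes units, bits 32-35
--     set_bits(bits, 40, minutes // 10, 3)    # minutes tens, bits 40-42
--     bits[43] = 0                            # binary group flag
--
--     # Hours
--     set_bits(bits, 48, hours % 10, 4)       # hours units, bits 48-51
--     set_bits(bits, 56, hours // 10, 2)      # hours tens, bits 56-57
--     bits[58] = 0                            # binary group flag
--     bits[59] = 0                            # binary group flag
--
--     # User bits blijven hier allemaal 0:
--     # 4-7, 12-15, 20-23, 28-31,
--     # 36-39, 44-47, 52-55, 60-63
--
--     # Sync word, bits 64-79, LSB-first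
--     sync_bits = [int(c) for c in "0011111111111101"]
--     bits[64:80] = sync_bits
--
--     return bits
--
-- def make_ltc_bitstream(
--     fps=25,
--     duration=10,
--     start_hour=0,
--     start_minute=0,
--     start_second=0,
--     start_frame=0,
-- ):
--     fps_int = int(round(fps))
--
--     start_frame_number = (
--         ((start_hour * 3600) + (start_minute * 60) + start_second)
--         * fps_int
--         + start_frame
--     )
--
--     frame_count = int(duration * int(round(fps)))
--     bitstream = []
--
--     for i in range(frame_count):
--         bitstream.extend(make_ltc_frame(start_frame_number + i, fps))
--
--     return bitstream
-- ===== SOURCE B (Python) =====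
-- def _bits_of(v, count):
--     # count LSB-first bits of v (Python >> is arithmetic, & masks)
--     return [(v >> i) & 1 for i in range(count)]
--
--
-- def _ltc_frame_of(fr, s, m, h):
--     # 80-bit LTC frame assembled by concatenation from the four timecode fields
--     return (
--         _bits_of(fr % 10, 4) + [0, 0, 0, 0] + _bits_of(fr // 10, 2) + [0, 0, 0, 0, 0, 0]
--         + _bits_of(s % 10, 4) + [0, 0, 0, 0] + _bits_of(s // 10, 3) + [0, 0, 0, 0, 0]
--         + _bits_of(m % 10, 4) + [0, 0, 0, 0] + _bits_of(m // 10, 3) + [0, 0, 0, 0, 0]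
--         + _bits_of(h % 10, 4) + [0, 0, 0, 0] + _bits_of(h // 10, 2) + [0, 0, 0, 0, 0, 0]
--         + [0, 0, 1, 1, 1, 1, 1, 1, 1, 1, 1, 1, 1, 1, 0, 1]
--     )
--
--
-- def make_ltc_bitstream(
--     fps=25,
--     duration=10,
--     start_hour=0,
--     start_minute=0,
--     start_second=0,
--     start_frame=0,
-- ):
--     fps_int = int(round(fps))
--     n0 = ((start_hour * 3600) + (start_minute * 60) + start_second) * fps_int + start_frame
--     frame_count = int(duration * fps_int)
--     if frame_count <= 0:
--         return []
--     # odometer initialised once from the normalized start frame number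
--     ts = n0 // fps_int
--     fr = n0 % fps_int
--     s = ts % 60
--     m = (ts // 60) % 60
--     h = (ts // 3600) % 24
--     out = []
--     for _ in range(frame_count):
--         out.extend(_ltc_frame_of(fr, s, m, h))
--         fr += 1
--         if fr == fps_int:
--             fr = 0
--             s += 1
--             if s == 60:
--                 s = 0
--                 m += 1
--                 if m == 60:
--                     m = 0
--                     h += 1
--                     if h == 24:
--                         h = 0
--     return out
-- ===== Notes on version B (the rewrite author's own statement) =====
-- stated objective: alternative
-- what changed: B replaces A's per-frame recomputation of hours/minutes/seconds/frames from the absolute frame index (one //,% cascade per frame) and A's bit-setting into a mutable 80-slot array with a rollover odometer advanced incrementally per frame and frames assembled by list concatenation of BCD bit groups.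
import Mathlib
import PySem

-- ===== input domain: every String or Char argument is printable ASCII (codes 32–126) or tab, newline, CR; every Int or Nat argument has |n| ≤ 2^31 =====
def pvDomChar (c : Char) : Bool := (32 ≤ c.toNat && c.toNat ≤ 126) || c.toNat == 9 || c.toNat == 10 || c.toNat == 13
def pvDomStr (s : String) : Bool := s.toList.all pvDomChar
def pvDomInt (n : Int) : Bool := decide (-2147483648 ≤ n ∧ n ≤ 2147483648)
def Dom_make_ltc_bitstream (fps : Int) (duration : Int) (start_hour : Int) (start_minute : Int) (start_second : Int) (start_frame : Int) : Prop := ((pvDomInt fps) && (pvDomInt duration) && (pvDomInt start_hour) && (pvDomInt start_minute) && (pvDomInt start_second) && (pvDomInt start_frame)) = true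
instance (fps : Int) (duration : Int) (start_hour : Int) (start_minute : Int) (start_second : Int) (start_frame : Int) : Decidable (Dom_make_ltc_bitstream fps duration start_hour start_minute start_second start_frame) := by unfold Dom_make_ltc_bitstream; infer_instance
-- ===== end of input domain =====

-- ===== PORT A =====
-- B replaces A's per-frame //,% division cascade with an incrementally advanced
-- hh:mm:ss:ff odometer and assembles each 80-bit frame by concatenation instead of
-- setting bits in a mutable array; objective: alternative (same cost, different algorithm).

-- set_bits(bits, start, value, count): bits[start+i] = (value >> i) & 1 for i in range(count)
def set_bits (bits : List Int) (start : Int) (value : Int) (count : Int) : List Int :=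
  (PySem.List.pyRange 0 count 1).foldl
    (fun b i => PySem.List.pySetD b (start + i) (PySem.Int.band (value >>> i.toNat) 1)) bits

-- make_ltc_frame(frame_number, fps, *, drop_frame=False); fps_int = int(round(fps)) = fps on Int
def make_ltc_frame (frame_number : Int) (fps : Int) (drop_frame : Bool) : List Int :=
  let fps_int := fps
  let frames := PySem.Int.mod frame_number fps_int
  let total_seconds := PySem.Int.floordiv frame_number fps_int
  let seconds := PySem.Int.mod total_seconds 60
  let minutes := PySem.Int.mod (PySem.Int.floordiv total_seconds 60) 60
  let hours := PySem.Int.mod (PySem.Int.floordiv total_seconds 3600) 24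
  let bits : List Int := List.replicate 80 0
  let bits := set_bits bits 0 (PySem.Int.mod frames 10) 4
  let bits := set_bits bits 8 (PySem.Int.floordiv frames 10) 2
  let bits := PySem.List.pySetD bits 10 (if drop_frame then 1 else 0)
  let bits := PySem.List.pySetD bits 11 0
  let bits := set_bits bits 16 (PySem.Int.mod seconds 10) 4
  let bits := set_bits bits 24 (PySem.Int.floordiv seconds 10) 3
  let bits := PySem.List.pySetD bits 27 0
  let bits := set_bits bits 32 (PySem.Int.mod minutes 10) 4
  let bits := set_bits bits 40 (PySem.Int.floordiv minutes 10) 3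
  let bits := PySem.List.pySetD bits 43 0
  let bits := set_bits bits 48 (PySem.Int.mod hours 10) 4
  let bits := set_bits bits 56 (PySem.Int.floordiv hours 10) 2
  let bits := PySem.List.pySetD bits 58 0
  let bits := PySem.List.pySetD bits 59 0
  -- [int(c) for c in "0011111111111101"]
  let sync_bits : List Int := [0, 0, 1, 1, 1, 1, 1, 1, 1, 1, 1, 1, 1, 1, 0, 1]
  -- bits[64:80] = sync_bits : bits has length 80, so this replaces the final 16 entries
  bits.take 64 ++ sync_bits

def make_ltc_bitstream (fps : Int) (duration : Int) (start_hour : Int) (start_minute : Int) (start_second : Int) (start_frame : Int) : List Int :=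
  let fps_int := fps
  let start_frame_number := ((start_hour * 3600) + (start_minute * 60) + start_second) * fps_int + start_frame
  let frame_count := duration * fps_int
  (PySem.List.pyRange 0 frame_count 1).foldl
    (fun acc i => acc ++ make_ltc_frame (start_frame_number + i) fps false) []

-- ===== PORT B =====
-- _bits_of(v, count) = [(v >> i) & 1 for i in range(count)]
def bits_of (v : Int) (count : Int) : List Int :=
  (PySem.List.pyRange 0 count 1).map (fun i => PySem.Int.band (v >>> i.toNat) 1)

-- _ltc_frame_of(fr, s, m, h): the 80-bit frame assembled by concatenation
def ltc_frame_of (fr s m h : Int) : List Int :=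
  bits_of (PySem.Int.mod fr 10) 4 ++ [0, 0, 0, 0] ++ bits_of (PySem.Int.floordiv fr 10) 2 ++ [0, 0, 0, 0, 0, 0]
  ++ bits_of (PySem.Int.mod s 10) 4 ++ [0, 0, 0, 0] ++ bits_of (PySem.Int.floordiv s 10) 3 ++ [0, 0, 0, 0, 0]
  ++ bits_of (PySem.Int.mod m 10) 4 ++ [0, 0, 0, 0] ++ bits_of (PySem.Int.floordiv m 10) 3 ++ [0, 0, 0, 0, 0]
  ++ bits_of (PySem.Int.mod h 10) 4 ++ [0, 0, 0, 0] ++ bits_of (PySem.Int.floordiv h 10) 2 ++ [0, 0, 0, 0, 0, 0]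
  ++ [0, 0, 1, 1, 1, 1, 1, 1, 1, 1, 1, 1, 1, 1, 0, 1]

-- the per-frame odometer loop: emit the frame, then advance ff:ss:mm:hh with rollover
def ltc_loop : Nat → Int → Int → Int → Int → Int → List Int → List Int
  | 0, _, _, _, _, _, acc => acc
  | k + 1, fpsi, fr, s, m, h, acc =>
    let acc := acc ++ ltc_frame_of fr s m h
    if fr + 1 = fpsi then
      if s + 1 = 60 then
        if m + 1 = 60 then
          if h + 1 = 24 then ltc_loop k fpsi 0 0 0 0 acc
          else ltc_loop k fpsi 0 0 0 (h + 1) acc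
        else ltc_loop k fpsi 0 0 (m + 1) h acc
      else ltc_loop k fpsi 0 (s + 1) m h acc
    else ltc_loop k fpsi (fr + 1) s m h acc

def make_ltc_bitstream_alt (fps : Int) (duration : Int) (start_hour : Int) (start_minute : Int) (start_second : Int) (start_frame : Int) : List Int :=
  let fps_int := fps
  let n0 := ((start_hour * 3600) + (start_minute * 60) + start_second) * fps_int + start_frame
  let frame_count := duration * fps_int
  if frame_count ≤ 0 then []
  else
    let ts := PySem.Int.floordiv n0 fps_int
    ltc_loop frame_count.toNat fps_int
      (PySem.Int.mod n0 fps_int)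
      (PySem.Int.mod ts 60)
      (PySem.Int.mod (PySem.Int.floordiv ts 60) 60)
      (PySem.Int.mod (PySem.Int.floordiv ts 3600) 24)
      []

-- ===== PRECONDITION & SPEC =====
-- Pre_ excludes only a negative fps combined with a negative duration (malformed inputs, outside
-- the task's natural domain, whose product still makes the frame count positive), on which A
-- returns a stream whose timecode fields come from Python's negative-divisor modulo and are
-- meaningless as LTC; B's odometer does not reproduce them.
def Pre_make_ltc_bitstream (fps : Int) (duration : Int) (start_hour : Int) (start_minute : Int) (start_second : Int) (start_frame : Int) : Prop :=
  0 ≤ fps ∨ 0 ≤ duration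
instance (fps : Int) (duration : Int) (start_hour : Int) (start_minute : Int) (start_second : Int) (start_frame : Int) : Decidable (Pre_make_ltc_bitstream fps duration start_hour start_minute start_second start_frame) := by unfold Pre_make_ltc_bitstream; infer_instance

def pvWitness_make_ltc_bitstream : Int × Int × Int × Int × Int × Int := (25, 1, 0, 59, 59, 24)

def Spec_make_ltc_bitstream (fps : Int) (duration : Int) (start_hour : Int) (start_minute : Int) (start_second : Int) (start_frame : Int) (out : List Int) : Prop := out = make_ltc_bitstream_alt fps duration start_hour start_minute start_second start_frame
instance (fps : Int) (duration : Int) (start_hour : Int) (start_minute : Int) (start_second : Int) (start_frame : Int) (out : List Int) : Decidable (Spec_make_ltc_bitstream fps duration start_hour start_minute start_second start_frame out) := by unfold Spec_make_ltc_bitstream; infer_instance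

-- ===== CLAIM (what is proved, stated in full; the proofs are below) =====
def Claim_equal_make_ltc_bitstream : Prop := ∀ (fps : Int) (duration : Int) (start_hour : Int) (start_minute : Int) (start_second : Int) (start_frame : Int), Dom_make_ltc_bitstream fps duration start_hour start_minute start_second start_frame → Pre_make_ltc_bitstream fps duration start_hour start_minute start_second start_frame → Spec_make_ltc_bitstream fps duration start_hour start_minute start_second start_frame (make_ltc_bitstream fps duration start_hour start_minute start_second start_frame)

-- ===== LEMMAS AND PROOFS =====

-- the four timecode fields A computes for absolute frame n at rate f
def pvFr (n f : Int) : Int := PySem.Int.mod n f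
def pvS (n f : Int) : Int := PySem.Int.mod (PySem.Int.floordiv n f) 60
def pvM (n f : Int) : Int := PySem.Int.mod (PySem.Int.floordiv (PySem.Int.floordiv n f) 60) 60
def pvH (n f : Int) : Int := PySem.Int.mod (PySem.Int.floordiv (PySem.Int.floordiv n f) 3600) 24

-- A's frame builder equals B's concatenation builder on the same field values
theorem pv_frame_eq (n f : Int) :
    make_ltc_frame n f false = ltc_frame_of (pvFr n f) (pvS n f) (pvM n f) (pvH n f) := by
  have hz : ∀ x : Int, x >>> (0:Int) = x := fun x => by
    simpa using Int.shiftRight_natCast_right x 0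
  have h1 : ∀ x : Int, x >>> (1:Int) = x >>> (1:Nat) := fun x => by
    exact_mod_cast Int.shiftRight_natCast_right x 1
  have h2 : ∀ x : Int, x >>> (2:Int) = x >>> (2:Nat) := fun x => by
    exact_mod_cast Int.shiftRight_natCast_right x 2
  have h3 : ∀ x : Int, x >>> (3:Int) = x >>> (3:Nat) := fun x => by
    exact_mod_cast Int.shiftRight_natCast_right x 3
  simp [make_ltc_frame, ltc_frame_of, set_bits, bits_of, hz, h1, h2, h3,
    show PySem.List.pyRange 0 2 1 = [0,1] by decide,
    show PySem.List.pyRange 0 3 1 = [0,1,2] by decide,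
    show PySem.List.pyRange 0 4 1 = [0,1,2,3] by decide,
    PySem.List.pySetD_of_nonneg, List.replicate, pvFr, pvS, pvM, pvH, Int.shiftRight_zero]

-- odometer tick = recompute-from-(n+1), for positive fps
theorem pv_tick (n f : Int) (hf : 0 < f) :
    (if pvFr n f + 1 = f then
      (0, if pvS n f + 1 = 60 then
            (0, if pvM n f + 1 = 60 then
                  (0, if pvH n f + 1 = 24 then 0 else pvH n f + 1)
                else (pvM n f + 1, pvH n f))
          else (pvS n f + 1, pvM n f, pvH n f))
     else (pvFr n f + 1, pvS n f, pvM n f, pvH n f))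
    = (pvFr (n + 1) f, pvS (n + 1) f, pvM (n + 1) f, pvH (n + 1) f) := by
  have hne : f ≠ 0 := by omega
  simp only [pvFr, pvS, pvM, pvH, PySem.Int.mod_eq_emod_of_pos hf,
    PySem.Int.floordiv_eq_ediv_of_pos hf,
    PySem.Int.mod_eq_emod_of_pos (show (0:Int) < 60 by norm_num),
    PySem.Int.mod_eq_emod_of_pos (show (0:Int) < 24 by norm_num),
    PySem.Int.floordiv_eq_ediv_of_pos (show (0:Int) < 60 by norm_num),
    PySem.Int.floordiv_eq_ediv_of_pos (show (0:Int) < 3600 by norm_num)]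
  have h0 : 0 ≤ n % f := Int.emod_nonneg n hne
  have h1 : n % f < f := Int.emod_lt_of_pos n hf
  have hn : f * (n / f) + n % f = n := Int.mul_ediv_add_emod n f
  by_cases hc : n % f + 1 = f
  · have key : (n + 1) / f = n / f + 1 ∧ (n + 1) % f = 0 :=
      (Int.ediv_emod_unique hf).mpr ⟨by linarith, le_refl 0, hf⟩
    rw [key.1, key.2]
    split_ifs <;> simp_all [Prod.mk.injEq] <;> omega
  · have key : (n + 1) / f = n / f ∧ (n + 1) % f = n % f + 1 :=
      (Int.ediv_emod_unique hf).mpr ⟨by linarith, by omega, by omega⟩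
    rw [key.1, key.2]
    split_ifs <;> simp_all

set_option maxRecDepth 4000 in
theorem pv_loop_eq (f : Int) (hf : 0 < f) :
    ∀ (k : Nat) (n : Int) (acc : List Int),
      ltc_loop k f (pvFr n f) (pvS n f) (pvM n f) (pvH n f) acc
        = acc ++ (List.range k).flatMap (fun j : Nat => make_ltc_frame (n + (j : Int)) f false) := by
  intro k
  induction k with
  | zero => intro n acc; simp [ltc_loop]
  | succ k ih =>
    intro n acc
    have hstep : ∀ (fr s m h : Int) (acc : List Int),
        ltc_loop (k + 1) f fr s m h acc =
          (fun t : Int × Int × Int × Int =>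
            ltc_loop k f t.1 t.2.1 t.2.2.1 t.2.2.2 (acc ++ ltc_frame_of fr s m h))
          (if fr + 1 = f then
            (0, if s + 1 = 60 then
                  (0, if m + 1 = 60 then
                        (0, if h + 1 = 24 then 0 else h + 1)
                      else (m + 1, h))
                else (s + 1, m, h))
           else (fr + 1, s, m, h)) := by
      intro fr s m h acc
      simp only [ltc_loop]
      split_ifs <;> rfl
    rw [hstep, pv_tick n f hf]
    beta_reduce
    rw [ih (n + 1) (acc ++ ltc_frame_of (pvFr n f) (pvS n f) (pvM n f) (pvH n f))]
    rw [List.range_succ_eq_map]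
    simp only [List.flatMap_cons, List.flatMap_map, Nat.cast_zero, add_zero,
      ← List.append_assoc]
    rw [pv_frame_eq n f]
    have harg : ∀ a : Nat, n + (↑(a.succ) : Int) = n + 1 + (a : Int) := fun a => by
      push_cast; ring
    simp only [harg]

-- ===== VERDICT (by name: the statement is the Claim_ definition above) =====
theorem make_ltc_bitstream_spec : Claim_equal_make_ltc_bitstream := by
  intro fps duration start_hour start_minute start_second start_frame _ hpre
  unfold Pre_make_ltc_bitstream at hpre
  unfold Spec_make_ltc_bitstream
  simp only [make_ltc_bitstream, make_ltc_bitstream_alt]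
  by_cases hc : duration * fps ≤ 0
  · rw [if_pos hc, PySem.List.pyRange_one_eq_nil hc]
    rfl
  · rw [if_neg hc]
    have hcpos : 0 < duration * fps := by omega
    have hf : 0 < fps := by
      by_contra hng
      push_neg at hng
      rcases hpre with h | h
      · have : fps = 0 := le_antisymm hng h
        rw [this, mul_zero] at hcpos
        exact absurd hcpos (by norm_num)
      · nlinarith
    rw [PySem.List.foldl_append_eq_flatMap, PySem.List.pyRange_one]
    set n0 := ((start_hour * 3600) + (start_minute * 60) + start_second) * fps + start_frame with hn0
    rw [show PySem.Int.mod n0 fps = pvFr n0 fps from rfl,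
      show PySem.Int.mod (PySem.Int.floordiv n0 fps) 60 = pvS n0 fps from rfl,
      show PySem.Int.mod (PySem.Int.floordiv (PySem.Int.floordiv n0 fps) 60) 60 = pvM n0 fps from rfl,
      show PySem.Int.mod (PySem.Int.floordiv (PySem.Int.floordiv n0 fps) 3600) 24 = pvH n0 fps from rfl,
      pv_loop_eq fps hf (duration * fps).toNat n0 []]
    simp [List.flatMap_map]
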